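-- pv_equiv track=rewrite | github.com/vishnutilak/Daily-code-challenge--fCC.org | 21stDec2025/dayLight Hours-BINsear.py | daylight_hours
-- ===== SOURCE A (Python) =====
-- def daylight_hours(latitude):
--     lats = [-90, -75, -60, -45, -30, -15, 0, 15, 30, 45, 60, 75, 90]
--     hours = [24, 23, 21, 15, 13, 12, 12, 11, 10, 9, 6, 2, 0]
--
--     left = 0
--     right = len(lats) - 1
--
--     # Handle boundaries early
--     if latitude <= lats[0]:
--         return hours[0]
--     if latitude >= lats[-1]:
--         return hours[-1]
--
--     # Binary search to find closest position
--     while left <= right: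
--         mid = (left + right) // 2
--
--         if lats[mid] == latitude:
--             return hours[mid]
--         elif lats[mid] < latitude:
--             left = mid + 1
--         else:
--             right = mid - 1
--
--     # Now: right < left
--     # right is index of smaller neighbor
--     # left is index of larger neighbor
--     if abs(latitude - lats[right]) <= abs(latitude - lats[left]):
--         return hours[right]
--     else:
--         return hours[left]
-- ===== SOURCE B (Python) =====
-- def daylight_hours(latitude):
--     lats = [-90, -75, -60, -45, -30, -15, 0, 15, 30, 45, 60, 75, 90]
--     hours = [24, 23, 21, 15, 13, 12, 12, 11, 10, 9, 6, 2, 0]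
--     best = min(range(len(lats)), key=lambda i: abs(latitude - lats[i]))
--     return hours[best]
-- ===== Notes on version B (the rewrite author's own statement) =====
-- stated objective: simpler
-- what changed: Replaced the boundary guards plus binary search plus neighbour comparison by a single linear nearest-neighbour scan: min over indices keyed by abs(latitude - lats[i]) (first minimum wins, matching A's <= tie-break; integer latitudes can never tie since the bands are 15 apart).
import Mathlib
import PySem

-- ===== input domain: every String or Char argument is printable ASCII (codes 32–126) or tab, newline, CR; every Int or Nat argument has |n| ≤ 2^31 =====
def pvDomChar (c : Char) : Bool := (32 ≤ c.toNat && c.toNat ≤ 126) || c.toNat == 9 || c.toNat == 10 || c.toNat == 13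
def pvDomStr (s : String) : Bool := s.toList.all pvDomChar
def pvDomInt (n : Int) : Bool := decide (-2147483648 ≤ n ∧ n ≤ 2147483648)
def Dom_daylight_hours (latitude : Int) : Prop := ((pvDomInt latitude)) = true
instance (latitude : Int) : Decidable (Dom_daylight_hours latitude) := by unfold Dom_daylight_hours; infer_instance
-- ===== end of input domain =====

-- B replaces A's boundary guards + binary search + neighbour comparison by a single
-- nearest-neighbour scan (min over indices by |latitude - lats[i]|); objective: simpler.

-- ===== PORT A =====
def dlLats : List Int := [-90, -75, -60, -45, -30, -15, 0, 15, 30, 45, 60, 75, 90]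
def dlHours : List Int := [24, 23, 21, 15, 13, 12, 12, 11, 10, 9, 6, 2, 0]

-- A's while loop; the fuel only makes the recursion structural (the loop halves the
-- interval, so 13 iterations are never exhausted on this 13-entry table).
-- indices are always in range here, so `.getD 0` after pyGet? is never taken.
def dlLoop (latitude : Int) : Nat → Int → Int → Int
  | 0, _, _ => 0
  | fuel+1, left, right =>
    if left ≤ right then
      let mid := PySem.Int.floordiv (left + right) 2
      let lm := (PySem.List.pyGet? dlLats mid).getD 0
      if lm = latitude then (PySem.List.pyGet? dlHours mid).getD 0
      else if lm < latitude then dlLoop latitude fuel (mid + 1) right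
      else dlLoop latitude fuel left (mid - 1)
    else
      if (latitude - (PySem.List.pyGet? dlLats right).getD 0).natAbs
           ≤ (latitude - (PySem.List.pyGet? dlLats left).getD 0).natAbs
      then (PySem.List.pyGet? dlHours right).getD 0
      else (PySem.List.pyGet? dlHours left).getD 0

def daylight_hours (latitude : Int) : Int :=
  if latitude ≤ (PySem.List.pyGet? dlLats 0).getD 0 then (PySem.List.pyGet? dlHours 0).getD 0
  else if latitude ≥ (PySem.List.pyGet? dlLats (-1)).getD 0 then (PySem.List.pyGet? dlHours (-1)).getD 0
  else dlLoop latitude 13 0 ((dlLats.length : Int) - 1)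

-- ===== PORT B =====
def daylight_hours_alt (latitude : Int) : Int :=
  let lats : List Int := [-90, -75, -60, -45, -30, -15, 0, 15, 30, 45, 60, 75, 90]
  let hours : List Int := [24, 23, 21, 15, 13, 12, 12, 11, 10, 9, 6, 2, 0]
  let best := (PySem.List.min? (PySem.List.pyRange 0 (lats.length : Int) 1)
      (fun i => (latitude - PySem.List.pyGetD lats i 0).natAbs)).getD 0
  PySem.List.pyGetD hours best 0

-- ===== PRECONDITION & SPEC =====
def Spec_daylight_hours (latitude : Int) (out : Int) : Prop := out = daylight_hours_alt latitude
instance (latitude : Int) (out : Int) : Decidable (Spec_daylight_hours latitude out) := by unfold Spec_daylight_hours; infer_instance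

-- ===== CLAIM (what is proved, stated in full; the proofs are below) =====
def Claim_equal_daylight_hours : Prop := ∀ (latitude : Int), Dom_daylight_hours latitude → Spec_daylight_hours latitude (daylight_hours latitude)

-- ===== LEMMAS AND PROOFS =====

lemma alt_low (lat : Int) (h : lat ≤ -90) : daylight_hours_alt lat = 24 := by
  simp only [daylight_hours_alt]
  rw [show PySem.List.pyRange 0 (([-90, -75, -60, -45, -30, -15, 0, 15, 30, 45, 60, 75, 90] : List Int).length : Int) 1
        = [0, 1, 2, 3, 4, 5, 6, 7, 8, 9, 10, 11, 12] from by decide]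
  rcases hm : PySem.List.min? ([0, 1, 2, 3, 4, 5, 6, 7, 8, 9, 10, 11, 12] : List Int)
      (fun i => (lat - PySem.List.pyGetD ([-90, -75, -60, -45, -30, -15, 0, 15, 30, 45, 60, 75, 90] : List Int) i 0).natAbs) with _ | m
  · rw [PySem.List.min?_eq_none_iff] at hm; simp at hm
  · have hmem := PySem.List.min?_mem hm
    have h0 := PySem.List.min?_isMin hm 0 (by decide)
    simp only [List.mem_cons, List.not_mem_nil, or_false] at hmem
    rcases hmem with rfl | rfl | rfl | rfl | rfl | rfl | rfl | rfl | rfl | rfl | rfl | rfl | rfl <;>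
      first | rfl | (exfalso; simp [PySem.List.pyGetD] at h0; omega)

lemma alt_high (lat : Int) (h : 90 ≤ lat) : daylight_hours_alt lat = 0 := by
  simp only [daylight_hours_alt]
  rw [show PySem.List.pyRange 0 (([-90, -75, -60, -45, -30, -15, 0, 15, 30, 45, 60, 75, 90] : List Int).length : Int) 1
        = [0, 1, 2, 3, 4, 5, 6, 7, 8, 9, 10, 11, 12] from by decide]
  rcases hm : PySem.List.min? ([0, 1, 2, 3, 4, 5, 6, 7, 8, 9, 10, 11, 12] : List Int)
      (fun i => (lat - PySem.List.pyGetD ([-90, -75, -60, -45, -30, -15, 0, 15, 30, 45, 60, 75, 90] : List Int) i 0).natAbs) with _ | m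
  · rw [PySem.List.min?_eq_none_iff] at hm; simp at hm
  · have hmem := PySem.List.min?_mem hm
    have h0 := PySem.List.min?_isMin hm 12 (by decide)
    simp only [List.mem_cons, List.not_mem_nil, or_false] at hmem
    rcases hmem with rfl | rfl | rfl | rfl | rfl | rfl | rfl | rfl | rfl | rfl | rfl | rfl | rfl <;>
      first | rfl | (exfalso; simp [PySem.List.pyGetD] at h0; omega)

lemma a_low (lat : Int) (h : lat ≤ -90) : daylight_hours lat = 24 := by
  unfold daylight_hours
  rw [show ((PySem.List.pyGet? dlLats 0).getD 0 : Int) = -90 from by decide,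
      if_pos (show lat ≤ -90 from h)]
  decide

lemma a_high (lat : Int) (h : 90 ≤ lat) : daylight_hours lat = 0 := by
  unfold daylight_hours
  rw [show ((PySem.List.pyGet? dlLats 0).getD 0 : Int) = -90 from by decide,
      show ((PySem.List.pyGet? dlLats (-1)).getD 0 : Int) = 90 from by decide,
      if_neg (show ¬ lat ≤ -90 by omega), if_pos (show lat ≥ 90 from h)]
  decide

-- ===== VERDICT (by name: the statement is the Claim_ definition above) =====
theorem daylight_hours_spec : Claim_equal_daylight_hours := by
  intro lat _
  unfold Spec_daylight_hours
  by_cases h1 : lat ≤ -90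
  · rw [a_low lat h1, alt_low lat h1]
  · by_cases h2 : 90 ≤ lat
    · rw [a_high lat h2, alt_high lat h2]
    · have hl : -89 ≤ lat := by omega
      have hr : lat ≤ 89 := by omega
      interval_cases lat <;> decide
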